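-- pv_equiv track=rewrite | github.com/jtsylve/ida-mcp | src/ida_mcp/transforms.py | _join_union
-- ===== SOURCE A (Python) =====
-- from collections.abc import Sequence
--
-- def _join_union(labels: Sequence[str]) -> str:
--     """Join rendered union branches, collapsing a ``None`` branch into ``X | None``.
--
--     Shared by JSON-schema and Python-annotation renderers so both emit the
--     same nullable shape.
--     """
--     deduped = list(dict.fromkeys(labels))
--     non_none = [b for b in deduped if b != "None"]
--     if len(non_none) == len(deduped):
--         return " | ".join(deduped) if deduped else "any"
--     if not non_none:
--         return "None"
--     return f"{' | '.join(non_none)} | None"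
-- ===== SOURCE B (Python) =====
-- def _join_union(labels):
--     """Join rendered union branches, collapsing a ``None`` branch into ``X | None``."""
--     joined = None
--     seen = set()
--     had_none = False
--     for b in labels:
--         if b == "None":
--             had_none = True
--         elif b not in seen:
--             seen.add(b)
--             joined = b if joined is None else f"{joined} | {b}"
--     if joined is None:
--         return "None" if had_none else "any"
--     return f"{joined} | None" if had_none else joined
-- ===== Notes on version B (the rewrite author's own statement) =====
-- stated objective: alternative
-- what changed: B is a single explicit loop with an accumulator: it builds the joined string incrementally (joined = joined + ' | ' + b for each first-seen non-None label, tracked by a seen set and a had_none flag), instead of A's staged dedup-list / filter-list / length-comparison / final join pipeline.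
import Mathlib
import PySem

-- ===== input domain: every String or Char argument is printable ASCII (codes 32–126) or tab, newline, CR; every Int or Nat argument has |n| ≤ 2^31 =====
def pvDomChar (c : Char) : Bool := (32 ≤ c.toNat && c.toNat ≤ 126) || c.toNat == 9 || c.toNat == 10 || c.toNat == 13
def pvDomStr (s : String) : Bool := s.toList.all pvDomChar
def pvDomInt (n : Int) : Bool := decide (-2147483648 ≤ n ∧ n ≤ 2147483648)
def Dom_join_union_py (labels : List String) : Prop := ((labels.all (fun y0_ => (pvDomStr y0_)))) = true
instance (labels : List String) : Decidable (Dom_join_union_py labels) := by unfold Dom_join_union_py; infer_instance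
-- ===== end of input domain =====

-- B replaces A's staged dedup/filter/length-compare/join pipeline by one accumulator loop that builds the joined string incrementally (alternative decomposition, similar cost).


-- ===== PORT A =====
def join_union_py (labels : List String) : String :=
  let deduped := PySem.List.dedup labels
  let non_none := deduped.filter (fun b => b != "None")
  if non_none.length = deduped.length then
    (if deduped = [] then "any" else PySem.Str.join " | " deduped)
  else if non_none = [] then "None"
  else PySem.Str.join " | " non_none ++ " | None"

-- ===== PORT B =====
-- one loop-body step of B's for-loop: state = (joined so far, seen set, had_none flag)
def joinUnionStep (st : Option String × PySem.Set String × Bool) (b : String) :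
    Option String × PySem.Set String × Bool :=
  if b = "None" then (st.1, st.2.1, true)
  else if st.2.1.contains b then st
  else (some (match st.1 with | none => b | some p => p ++ " | " ++ b),
        PySem.Set.add st.2.1 b, st.2.2)

def join_union_py_alt (labels : List String) : String :=
  let st := labels.foldl joinUnionStep (none, PySem.Set.ofList [], false)
  match st.1, st.2.2 with
  | none, true => "None"
  | none, false => "any"
  | some p, true => p ++ " | None"
  | some p, false => p

-- ===== PRECONDITION & SPEC =====
def Spec_join_union_py (labels : List String) (out : String) : Prop := out = join_union_py_alt labels
instance (labels : List String) (out : String) : Decidable (Spec_join_union_py labels out) := by unfold Spec_join_union_py; infer_instance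

-- ===== CLAIM (what is proved, stated in full; the proofs are below) =====
def Claim_equal_join_union_py : Prop := ∀ (labels : List String), Dom_join_union_py labels → Spec_join_union_py labels (join_union_py labels)

-- ===== LEMMAS AND PROOFS =====

-- the joined-string accumulator that B's loop maintains, as a function of the list it has joined
def joinAcc (l : List String) : Option String :=
  if l = [] then none else some (PySem.Str.join " | " l)

theorem chars_join_snoc (sep : List Char) (l : List (List Char)) (x : List Char) (h : l ≠ []) :
    PySem.Chars.join sep (l ++ [x]) = PySem.Chars.join sep l ++ sep ++ x := by
  induction l with
  | nil => simp at h
  | cons a t ih =>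
    cases t with
    | nil => simp [PySem.Chars.join, List.intercalate, List.intersperse]
    | cons b t' =>
      have h2 := ih (by simp)
      simp only [PySem.Chars.join, List.intercalate, List.cons_append, List.intersperse] at h2 ⊢
      simp only [List.flatten_cons, List.append_assoc] at h2 ⊢
      rw [h2]

theorem str_join_snoc (sep : String) (l : List String) (x : String) (h : l ≠ []) :
    PySem.Str.join sep (l ++ [x]) = PySem.Str.join sep l ++ sep ++ x := by
  simp only [PySem.Str.join, List.map_append, List.map_cons, List.map_nil]
  rw [chars_join_snoc _ _ _ (by simpa using h)]
  simp [String.ofList_append, String.append_assoc]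

theorem str_join_singleton (sep x : String) : PySem.Str.join sep [x] = x := by
  simp [PySem.Str.join, PySem.Chars.join, List.intercalate]

theorem dedup_snoc (xs : List String) (x : String) :
    PySem.List.dedup (xs ++ [x]) = PySem.Set.add (PySem.List.dedup xs) x := by
  simp [PySem.List.dedup_eq_ofList, PySem.Set.ofList_eq_foldl]

theorem set_add_of_mem (acc : List String) (x : String) (h : x ∈ acc) :
    PySem.Set.add acc x = acc := by simp [PySem.Set.add, h]

theorem set_add_of_not_mem (acc : List String) (x : String) (h : x ∉ acc) :
    PySem.Set.add acc x = acc ++ [x] := by simp [PySem.Set.add, h]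

-- loop invariant: after processing xs, B's state is determined by the deduped non-None labels and membership of "None"
theorem fold_char (xs : List String) :
    xs.foldl joinUnionStep (none, PySem.Set.ofList [], false) =
      (joinAcc (PySem.List.dedup (xs.filter (fun b => b != "None"))),
       PySem.List.dedup (xs.filter (fun b => b != "None")),
       xs.contains "None") := by
  induction xs using List.reverseRecOn with
  | nil => simp [joinAcc, PySem.List.dedup, PySem.Set.ofList]
  | append_singleton ys x ih =>
    rw [List.foldl_append, ih]
    by_cases hx : x = "None"
    · subst hx
      simp [joinUnionStep, List.filter_append, List.contains_eq_mem]
    · have hfilter : (ys ++ [x]).filter (fun b => b != "None") =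
          ys.filter (fun b => b != "None") ++ [x] := by
        simp [List.filter_append, hx]
      rw [hfilter, dedup_snoc]
      set L := PySem.List.dedup (ys.filter (fun b => b != "None")) with hL
      have hx' : ¬ "None" = x := fun h => hx h.symm
      by_cases hm : x ∈ L
      · rw [set_add_of_mem _ _ hm]
        unfold joinUnionStep
        simp [hx, hx', hm, List.contains_eq_mem]
      · rw [set_add_of_not_mem _ _ hm]
        unfold joinUnionStep
        by_cases hE : L = []
        · simp [joinAcc, hE, hx, hx', List.contains_eq_mem, str_join_singleton]
        · have hne : ¬ (L ++ [x] = []) := by simp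
          simp [joinAcc, hx, hx', hm, hE, hne, List.contains_eq_mem,
            str_join_snoc _ _ _ hE]

-- Set.add commutes with filtering when the added element passes the test
theorem filter_add_pass (p : String → Bool) (acc : List String) (x : String) (hp : p x = true) :
    List.filter p (PySem.Set.add acc x) = PySem.Set.add (List.filter p acc) x := by
  simp only [PySem.Set.add]
  by_cases hm : x ∈ acc
  · have hmf : x ∈ List.filter p acc := List.mem_filter.2 ⟨hm, hp⟩
    simp [hm, hmf]
  · have hmf : x ∉ List.filter p acc := fun h => hm (List.mem_filter.1 h).1
    simp [hm, hmf, List.filter_append, hp]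

-- Set.add of a filtered-out element vanishes under the filter
theorem filter_add_fail (p : String → Bool) (acc : List String) (x : String) (hp : p x = false) :
    List.filter p (PySem.Set.add acc x) = List.filter p acc := by
  simp only [PySem.Set.add]
  by_cases hm : x ∈ acc
  · simp [hm]
  · simp [hm, List.filter_append, hp]

theorem filter_foldl_add (p : String → Bool) (xs acc : List String) :
    List.filter p (xs.foldl PySem.Set.add acc) = (xs.filter p).foldl PySem.Set.add (acc.filter p) := by
  induction xs generalizing acc with
  | nil => simp
  | cons x xs ih =>
    simp only [List.foldl_cons, List.filter_cons]
    rw [ih]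
    by_cases hp : p x = true
    · simp only [hp, if_pos, List.foldl_cons, filter_add_pass p acc x hp]
    · have hp' : p x = false := by simpa using hp
      simp only [hp', Bool.false_eq_true, if_false, filter_add_fail p acc x hp']

theorem dedup_filter_comm (p : String → Bool) (xs : List String) :
    PySem.List.dedup (xs.filter p) = (PySem.List.dedup xs).filter p := by
  simp only [PySem.List.dedup_eq_ofList, PySem.Set.ofList_eq_foldl]
  simpa using (filter_foldl_add p xs []).symm

-- ===== VERDICT (by name: the statement is the Claim_ definition above) =====
theorem join_union_py_spec : Claim_equal_join_union_py := by
  intro labels _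
  unfold Spec_join_union_py join_union_py join_union_py_alt
  rw [fold_char, dedup_filter_comm]
  set D := PySem.List.dedup labels with hD
  set p : String → Bool := fun b => b != "None" with hp
  by_cases hn : "None" ∈ labels
  · -- had_none = true
    have hnD : "None" ∈ D := by rw [hD]; exact (PySem.List.mem_dedup labels "None").2 hn
    have hlt : (D.filter p).length < D.length :=
      List.length_filter_lt_length_iff_exists.2 ⟨"None", hnD, by simp [hp]⟩
    have hne : ¬ (D.filter p).length = D.length := by omega
    have hc : labels.contains "None" = true := List.contains_iff_mem.2 hn
    simp only [hne, if_false, hc, joinAcc]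
    by_cases hE : D.filter p = [] <;> simp [hE]
  · -- had_none = false
    have hall : D.filter p = D := by
      apply List.filter_eq_self.2
      intro a ha
      have hmem : a ∈ labels := (PySem.List.mem_dedup labels a).1 (hD ▸ ha)
      simp only [hp, bne_iff_ne, ne_eq]
      intro h; exact hn (h ▸ hmem)
    have hc : labels.contains "None" = false := by simp [hn]
    simp only [hall, hc, joinAcc]
    by_cases hE : D = [] <;> simp [hE]
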